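-- pv_equiv track=rewrite | github.com/yeseong31/coding-test | 프로그래머스/3/60062. 외벽 점검/외벽 점검.py | solution
-- ===== SOURCE A (Python) =====
-- from itertools import permutations
--
-- def solution(n, weak, dist):
--     answer = len(dist) + 1
--     length = len(weak)
--
--     weak += [x + n for x in weak]
--     friends = list(permutations(dist, len(dist)))
--
--     for i in range(length):
--         for friend in friends:
--             cnt = 1
--             check = weak[i] + friend[cnt - 1]
--
--             for j in range(i, i + length):
--                 if check < weak[j]:
--                     cnt += 1
--                     if cnt > len(dist):
--                         break
--                     check = weak[j] + friend[cnt - 1]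
--
--             answer = min(answer, cnt)
--
--     return answer if answer <= len(dist) else -1
-- ===== SOURCE B (Python) =====
-- def _dfs(weak, j, end, rem, check, used):
--     # advance past weak points already covered by `check`
--     while j < end and weak[j] <= check:
--         j += 1
--     if j >= end:
--         return used
--     w = weak[j]
--     if not rem:
--         return used + 1
--     return min(_dfs(weak, j + 1, end, rem[:k] + rem[k + 1:], w + rem[k], used + 1)
--                for k in range(len(rem)))
--
--
-- def solution(n, weak, dist):
--     L = len(dist)
--     length = len(weak)
--     weak += [x + n for x in weak]
--     best = L + 1
--     for i in range(length):
--         for k in range(L):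
--             best = min(best, _dfs(weak, i, i + length,
--                                   dist[:k] + dist[k + 1:], weak[i] + dist[k], 1))
--     return best if best <= L else -1
-- ===== Notes on version B (the rewrite author's own statement) =====
-- stated objective: faster
-- what changed: A materialises all len(dist)! permutations and runs the greedy sweep for each; B replaces that with a recursive branch-and-cover search (DFS over which remaining friend to place at the next uncovered weak point) that explores only the placement prefixes actually needed, skipping covered weak points in a while loop.
import Mathlib
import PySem

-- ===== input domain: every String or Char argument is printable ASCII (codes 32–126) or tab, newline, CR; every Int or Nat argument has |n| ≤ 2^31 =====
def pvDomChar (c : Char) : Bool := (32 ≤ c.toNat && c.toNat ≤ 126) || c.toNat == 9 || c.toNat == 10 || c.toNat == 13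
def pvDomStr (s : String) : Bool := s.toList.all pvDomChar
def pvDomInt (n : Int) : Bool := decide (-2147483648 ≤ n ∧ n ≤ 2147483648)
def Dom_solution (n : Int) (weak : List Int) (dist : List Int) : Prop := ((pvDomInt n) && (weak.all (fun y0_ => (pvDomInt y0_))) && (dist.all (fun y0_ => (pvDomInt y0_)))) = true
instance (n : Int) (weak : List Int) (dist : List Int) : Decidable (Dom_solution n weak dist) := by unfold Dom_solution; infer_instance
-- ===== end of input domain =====

-- B replaces A's enumeration of all dist-permutations by a branch-and-cover DFS: faster, same return value.
-- (A mutates `weak` in place via `weak += …`; B performs the same mutation — the theorems below are about the return value.)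

-- ===== PORT A =====
-- the inner `for j in range(i, i+length)` loop of A, over the remaining j's;
-- state (cnt, check) exactly as in A; returns the final cnt (the break returns cnt immediately)
def loopA (weak2 friend : List Int) (L : Nat) : List Int → Int → Int → Int
  | [], cnt, _check => cnt
  | j :: js, cnt, check =>
    let w := PySem.List.pyGetD weak2 j 0
    if check < w then
      if cnt + 1 > (L : Int) then cnt + 1
      else loopA weak2 friend L js (cnt + 1) (w + PySem.List.pyGetD friend (cnt + 1 - 1) 0)
    else loopA weak2 friend L js cnt check

def solution (n : Int) (weak : List Int) (dist : List Int) : Int :=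
  let length := weak.length
  let weak2 := weak ++ weak.map (fun x => x + n)
  let friends := PySem.List.permutations dist dist.length
  let answer := (PySem.List.pyRange 0 (length : Int) 1).foldl (fun ans i =>
    friends.foldl (fun ans friend =>
      min ans (loopA weak2 friend dist.length (PySem.List.pyRange i (i + (length : Int)) 1) 1
        (PySem.List.pyGetD weak2 i 0 + PySem.List.pyGetD friend (1 - 1) 0))) ans)
    ((dist.length : Int) + 1)
  if answer ≤ (dist.length : Int) then answer else -1

-- ===== PORT B =====
-- B's `_dfs`: skip covered weak points, then branch over which remaining friend to place
def dfsB (weak2 : List Int) : List Int → List Int → Int → Int → Int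
  | [], _, _, used => used
  | j :: js, rem, check, used =>
    let w := PySem.List.pyGetD weak2 j 0
    if w ≤ check then dfsB weak2 js rem check used
    else
      match rem with
      | [] => used + 1
      | _ :: _ =>
        match (List.range rem.length).map
            (fun k => dfsB weak2 js (rem.eraseIdx k) (w + rem.getD k 0) (used + 1)) with
        | [] => used + 1   -- unreachable: rem ≠ [] so the mapped list is non-empty (Python's min of a non-empty generator)
        | c :: cs => cs.foldl min c

def solution_alt (n : Int) (weak : List Int) (dist : List Int) : Int :=
  let L := dist.length
  let length := weak.length
  let weak2 := weak ++ weak.map (fun x => x + n)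
  let best := (PySem.List.pyRange 0 (length : Int) 1).foldl (fun best i =>
    (List.range L).foldl (fun best k =>
      min best (dfsB weak2 (PySem.List.pyRange i (i + (length : Int)) 1)
        (dist.eraseIdx k) (PySem.List.pyGetD weak2 i 0 + dist.getD k 0) 1)) best)
    ((L : Int) + 1)
  if best ≤ (L : Int) then best else -1

-- ===== PRECONDITION & SPEC =====
-- Pre_ excludes exactly the inputs on which A raises IndexError: empty dist with non-empty weak
-- (A indexes friend[0] on the empty permutation there).
def Pre_solution (n : Int) (weak : List Int) (dist : List Int) : Prop := dist ≠ [] ∨ weak = []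
instance (n : Int) (weak : List Int) (dist : List Int) : Decidable (Pre_solution n weak dist) := by unfold Pre_solution; infer_instance

def pvWitness_solution : Int × List Int × List Int := (10, [1, 5], [3, 2])

def Spec_solution (n : Int) (weak : List Int) (dist : List Int) (out : Int) : Prop := out = solution_alt n weak dist
instance (n : Int) (weak : List Int) (dist : List Int) (out : Int) : Decidable (Spec_solution n weak dist out) := by unfold Spec_solution; infer_instance

-- ===== CLAIM (what is proved, stated in full; the proofs are below) =====
def Claim_equal_solution : Prop := ∀ (n : Int) (weak : List Int) (dist : List Int), Dom_solution n weak dist → Pre_solution n weak dist → Spec_solution n weak dist (solution n weak dist)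

-- ===== LEMMAS AND PROOFS =====

-- A's inner loop, reshaped so that the permutation is CONSUMED as a list instead of indexed by cnt-1
def gRun (weak2 : List Int) : List Int → List Int → Int → Int → Int
  | [], _, _, cnt => cnt
  | j :: js, p, check, cnt =>
    let w := PySem.List.pyGetD weak2 j 0
    if check < w then
      match p with
      | [] => cnt + 1
      | d :: p' => gRun weak2 js p' (w + d) (cnt + 1)
    else gRun weak2 js p check cnt

-- the definitional unfolding of PySem.List.permutations at a successor arity (cited, not re-proved)
theorem permutations_succ (xs : List Int) (r : Nat) :
    PySem.List.permutations xs (r + 1) =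
      (List.range xs.length).flatMap (fun i =>
        match xs[i]? with
        | none => []
        | some x => (PySem.List.permutations (xs.eraseIdx i) r).map (fun p => x :: p)) := by
  rw [PySem.List.permutations]
  refine congrArg (fun f => List.flatMap f (List.range xs.length)) ?_
  funext i
  cases xs[i]? <;> rfl

theorem permutations_ne_nil (rem : List Int) : PySem.List.permutations rem rem.length ≠ [] := by
  induction rem with
  | nil => decide
  | cons x xs ih =>
    rw [List.length_cons, permutations_succ]
    rw [Ne, List.flatMap_eq_nil_iff]
    intro h
    have h0 := h 0 (by simp)
    simp only [List.getElem?_cons_zero, List.eraseIdx_cons_zero] at h0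
    exact ih (List.map_eq_nil_iff.mp h0)

-- dfsB unfolded one step on a non-empty j-list (definitional; the `if` is stated, not decided)
theorem dfsB_cons (weak2 : List Int) (j : Int) (js rem : List Int) (check used : Int) :
    dfsB weak2 (j :: js) rem check used =
      (if PySem.List.pyGetD weak2 j 0 ≤ check then dfsB weak2 js rem check used
       else
        match rem with
        | [] => used + 1
        | _ :: _ =>
          match (List.range rem.length).map
              (fun k => dfsB weak2 js (rem.eraseIdx k)
                (PySem.List.pyGetD weak2 j 0 + rem.getD k 0) (used + 1)) with
          | [] => used + 1
          | c :: cs => cs.foldl min c) := rfl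

-- loopA with state (cnt, check) is gRun on the not-yet-consumed suffix of the permutation
theorem loopA_eq_gRun (weak2 : List Int) (L : Nat) :
    ∀ (js friend : List Int) (cnt check : Int), friend.length = L → 1 ≤ cnt → cnt ≤ (L : Int) →
    loopA weak2 friend L js cnt check = gRun weak2 js (friend.drop cnt.toNat) check cnt := by
  intro js
  induction js with
  | nil => intro friend cnt check _ _ _; rfl
  | cons j js ih =>
    intro friend cnt check hlen h1 hL
    simp only [loopA, gRun]
    by_cases hcw : check < PySem.List.pyGetD weak2 j 0
    · rw [if_pos hcw, if_pos hcw]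
      by_cases hcap : cnt + 1 > (L : Int)
      · have : friend.drop cnt.toNat = [] := by
          apply List.drop_eq_nil_of_le; omega
        rw [if_pos hcap, this]
      · rw [if_neg hcap]
        have hlt : cnt.toNat < friend.length := by omega
        rw [List.drop_eq_getElem_cons hlt]
        have hidx : PySem.List.pyGetD friend (cnt + 1 - 1) 0 = friend[cnt.toNat] := by
          have h' : cnt + 1 - 1 = cnt := by ring
          rw [h', PySem.List.pyGetD_eq_getElem friend 0 (by omega) (by omega)]
        rw [hidx]
        rw [ih friend (cnt + 1) (PySem.List.pyGetD weak2 j 0 + friend[cnt.toNat]) hlen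
          (by omega) (by omega)]
        have h'' : (cnt + 1).toNat = cnt.toNat + 1 := by omega
        rw [h'']
    · rw [if_neg hcw, if_neg hcw]
      exact ih friend cnt check hlen h1 hL

-- a fold accumulating `min acc (f x)` factors through `min a ·` of the bare min-fold
theorem foldl_min_map {X : Type} (f : X → Int) :
    ∀ (cs : List X) (c a : Int),
    cs.foldl (fun a x => min a (f x)) (min a c) = min a ((cs.map f).foldl min c) := by
  intro cs
  induction cs with
  | nil => intro c a; rfl
  | cons x cs ih =>
    intro c a
    simp only [List.foldl_cons, List.map_cons]
    rw [min_assoc, ih]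

theorem foldl_min_const {X : Type} :
    ∀ (l : List X), l ≠ [] → ∀ (a u : Int), l.foldl (fun a _ => min a u) a = min a u := by
  intro l
  induction l with
  | nil => intro h; exact absurd rfl h
  | cons x xs ih =>
    intro _ a u
    simp only [List.foldl_cons]
    rcases eq_or_ne xs [] with h | h
    · subst h; rfl
    · rw [ih h, min_assoc, min_self]

-- min over all orders of the remaining friends, computed by the greedy sweep, equals the DFS value
theorem foldl_perms_eq_dfsB (weak2 : List Int) :
    ∀ (js : List Int) (rem : List Int) (check used a : Int),
    (PySem.List.permutations rem rem.length).foldl (fun a p => min a (gRun weak2 js p check used)) a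
      = min a (dfsB weak2 js rem check used) := by
  intro js
  induction js with
  | nil =>
    intro rem check used a
    simp only [gRun, dfsB]
    exact foldl_min_const _ (permutations_ne_nil rem) a used
  | cons j js ih =>
    intro rem check used a
    by_cases hcw : check < PySem.List.pyGetD weak2 j 0
    · match rem with
      | [] =>
        show (PySem.List.permutations [] 0).foldl _ a = _
        simp only [PySem.List.permutations, List.foldl_cons, List.foldl_nil, gRun,
          dfsB_cons]
        rw [if_pos hcw, if_neg (not_le.mpr hcw)]
      | r :: rs =>
        rw [List.length_cons, permutations_succ, List.foldl_flatMap]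
        have hbody : ∀ (a : Int), ∀ i ∈ List.range (r :: rs).length,
            ((match (r :: rs)[i]? with
              | none => []
              | some x => (PySem.List.permutations ((r :: rs).eraseIdx i) rs.length).map
                  (fun p => x :: p)).foldl (fun a p => min a (gRun weak2 (j :: js) p check used)) a)
            = min a (dfsB weak2 js ((r :: rs).eraseIdx i)
                (PySem.List.pyGetD weak2 j 0 + (r :: rs).getD i 0) (used + 1)) := by
          intro a i hi
          have hilt : i < (r :: rs).length := List.mem_range.mp hi
          simp only [List.getElem?_eq_getElem hilt]
          rw [List.foldl_map]
          have hfun : ∀ (a : Int), ∀ p ∈ PySem.List.permutations ((r :: rs).eraseIdx i)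
              rs.length,
              min a (gRun weak2 (j :: js) ((r :: rs)[i] :: p) check used)
              = min a (gRun weak2 js p (PySem.List.pyGetD weak2 j 0 + (r :: rs)[i]) (used + 1)) := by
            intro a p _
            simp only [gRun]
            rw [if_pos hcw]
          rw [PySem.List.foldl_congr_mem _ _ _ _ hfun]
          have hlen : ((r :: rs).eraseIdx i).length = rs.length := by
            rw [List.length_eraseIdx, if_pos hilt]; simp
          rw [← hlen]
          rw [ih ((r :: rs).eraseIdx i) (PySem.List.pyGetD weak2 j 0 + (r :: rs)[i]) (used + 1) a]
          rw [List.getD_eq_getElem _ _ hilt]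
        rw [PySem.List.foldl_congr_mem _ _ _ _ hbody]
        have hne : List.range (r :: rs).length ≠ [] := by
          rw [Ne, List.range_eq_nil]; simp
        obtain ⟨c, cs, hrange⟩ : ∃ c cs, List.range (r :: rs).length = c :: cs :=
          List.exists_cons_of_ne_nil hne
        rw [dfsB_cons, if_neg (not_le.mpr hcw)]
        rw [hrange]
        simp only [List.map_cons, List.foldl_cons]
        exact foldl_min_map _ cs _ a
    · have hfun : ∀ (a : Int), ∀ p ∈ PySem.List.permutations rem rem.length,
          min a (gRun weak2 (j :: js) p check used) = min a (gRun weak2 js p check used) := by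
        intro a p _
        simp only [gRun]
        rw [if_neg hcw]
      rw [PySem.List.foldl_congr_mem _ _ _ _ hfun, ih]
      rw [dfsB_cons, if_pos (not_lt.mp hcw)]

-- for one start point, A's fold over all permutations equals B's fold over the first friend choice
theorem perStart (weak2 : List Int) (dist : List Int) (hd : dist ≠ []) (js : List Int)
    (wi : Int) (a : Int) :
    (PySem.List.permutations dist dist.length).foldl
        (fun a p => min a (loopA weak2 p dist.length js 1 (wi + PySem.List.pyGetD p (1 - 1) 0))) a
      = (List.range dist.length).foldl
        (fun a k => min a (dfsB weak2 js (dist.eraseIdx k) (wi + dist.getD k 0) 1)) a := by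
  match dist, hd with
  | d :: ds, _ =>
    rw [List.length_cons, permutations_succ, List.foldl_flatMap]
    apply PySem.List.foldl_congr_mem
    intro a i hi
    have hilt : i < (d :: ds).length := List.mem_range.mp hi
    simp only [List.getElem?_eq_getElem hilt]
    rw [List.foldl_map]
    have hfun : ∀ (a : Int), ∀ p ∈ PySem.List.permutations ((d :: ds).eraseIdx i) ds.length,
        min a (loopA weak2 ((d :: ds)[i] :: p) (ds.length + 1) js 1
          (wi + PySem.List.pyGetD ((d :: ds)[i] :: p) (1 - 1) 0))
        = min a (gRun weak2 js p (wi + (d :: ds)[i]) 1) := by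
      intro a p hp
      have hlen : ((d :: ds).eraseIdx i).length = ds.length := by
        rw [List.length_eraseIdx, if_pos hilt]; simp
      have hplen : p.length = ds.length := by
        rw [← hlen]
        exact (PySem.List.perm_of_mem_permutations (by rw [hlen]; exact hp)).length_eq
      have hfl : ((d :: ds)[i] :: p).length = ds.length + 1 := by
        simp [hplen]
      rw [loopA_eq_gRun weak2 (ds.length + 1) js ((d :: ds)[i] :: p) 1 _ hfl (le_refl 1)
        (by omega)]
      have h0 : (1 : Int) - 1 = 0 := by ring
      rw [h0, PySem.List.pyGetD_zero_cons]
      rfl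
    rw [PySem.List.foldl_congr_mem _ _ _ _ hfun]
    have hlen : ((d :: ds).eraseIdx i).length = ds.length := by
      rw [List.length_eraseIdx, if_pos hilt]; simp
    rw [← hlen, foldl_perms_eq_dfsB]
    rw [List.getD_eq_getElem _ _ hilt]

theorem ifneg_congr (x y L : Int) (h : x = y) :
    (if x ≤ L then x else -1) = (if y ≤ L then y else -1) := by rw [h]

-- ===== VERDICT (by name: the statement is the Claim_ definition above) =====
theorem solution_spec : Claim_equal_solution := by
  intro n weak dist _ hpre
  unfold Spec_solution solution solution_alt
  dsimp only
  rcases hpre with hd | hw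
  · apply ifneg_congr
    apply PySem.List.foldl_congr_mem
    intro acc i _
    exact perStart _ dist hd _ _ acc
  · subst hw
    rfl
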